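-- pv_equiv track=rewrite | github.com/skalingclouds/Multi-Agent-Custom-Automation-Engine-Solution-Accelerator | src/voice-server/audio_proxy.py | _linear_to_mulaw
-- ===== SOURCE A (Python) =====
-- MULAW_BIAS = 0x84
--
-- MULAW_CLIP = 32635
--
-- def _linear_to_mulaw(sample: int) -> int:
--     """Convert a 16-bit linear PCM sample to 8-bit mulaw.
--
--     Args:
--         sample: 16-bit signed linear PCM sample (-32768 to 32767).
--
--     Returns:
--         8-bit mulaw encoded value (0-255).
--     """
--     # Get sign and magnitude
--     sign = (sample >> 8) & 0x80
--     if sign != 0: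
--         sample = -sample
--     if sample > MULAW_CLIP:
--         sample = MULAW_CLIP
--
--     # Add bias for linear encoding
--     sample = sample + MULAW_BIAS
--
--     # Find the segment number
--     exponent = 7
--     mask = 0x4000
--     while exponent > 0 and (sample & mask) == 0:
--         exponent -= 1
--         mask >>= 1
--
--     # Extract mantissa
--     mantissa = (sample >> (exponent + 3)) & 0x0F
--
--     # Combine into mulaw byte
--     mulaw_byte = ~(sign | (exponent << 4) | mantissa) & 0xFF
--
--     return mulaw_byte
-- ===== SOURCE B (Python) =====
-- MULAW_BIAS = 0x84
--
-- MULAW_CLIP = 32635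
--
-- # Static segment table: _SEG[t] is the G.711 segment for the seven bits t of the
-- # biased sample above the mantissa (index of its highest set bit, plus one; zero when none is set).
-- _SEG = [0] + [1] + [2] * 2 + [3] * 4 + [4] * 8 + [5] * 16 + [6] * 32 + [7] * 64
--
--
-- def _linear_to_mulaw(sample: int) -> int:
--     """Convert a 16-bit linear PCM sample to 8-bit mulaw (table-driven segment lookup)."""
--     sign = (sample >> 8) & 0x80
--     if sign != 0:
--         sample = -sample
--     if sample > MULAW_CLIP:
--         sample = MULAW_CLIP
--     sample = sample + MULAW_BIAS
--
--     exponent = _SEG[(sample >> 8) & 0x7F]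
--
--     mantissa = (sample >> (exponent + 3)) & 0x0F
--     return ~(sign | (exponent << 4) | mantissa) & 0xFF
-- ===== Notes on version B (the rewrite author's own statement) =====
-- stated objective: simpler
-- what changed: The seven-step mask-shifting while loop that scans for the highest set bit is replaced by a static G.711-style segment lookup table indexed by the relevant bits of the biased sample.
import Mathlib
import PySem

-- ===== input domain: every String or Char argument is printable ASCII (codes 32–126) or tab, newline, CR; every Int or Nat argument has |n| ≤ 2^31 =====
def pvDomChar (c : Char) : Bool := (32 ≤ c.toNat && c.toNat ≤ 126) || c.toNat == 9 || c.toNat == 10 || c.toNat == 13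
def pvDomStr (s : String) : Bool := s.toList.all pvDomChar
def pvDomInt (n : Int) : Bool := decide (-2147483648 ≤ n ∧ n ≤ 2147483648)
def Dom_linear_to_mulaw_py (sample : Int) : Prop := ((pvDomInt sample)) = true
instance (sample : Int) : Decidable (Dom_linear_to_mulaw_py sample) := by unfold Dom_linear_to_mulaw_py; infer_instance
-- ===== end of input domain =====

-- B replaces A's seven-step mask-shifting bit-scan for the G.711 segment by a static
-- segment lookup table indexed with the seven bits above the mantissa of the biased sample (objective: simpler/canonical).

-- ===== PORT A =====
def pvMulawBias : Int := 0x84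
def pvMulawClip : Int := 32635

-- the while loop 'while exponent > 0 and (sample & mask) == 0: exponent -= 1; mask >>= 1',
-- transliterated as structural recursion on the decreasing exponent
def pvSegLoop (sample : Int) : Nat → Int → Int
  | 0, _ => 0
  | e + 1, mask =>
      if PySem.Int.band sample mask == 0 then pvSegLoop sample e (mask >>> 1)
      else ((e : Int) + 1)

def linear_to_mulaw_py (sample : Int) : Int :=
  let sign := PySem.Int.band (sample >>> 8) 0x80
  let sample := if sign ≠ 0 then -sample else sample
  let sample := if sample > pvMulawClip then pvMulawClip else sample
  let sample := sample + pvMulawBias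
  let exponent := pvSegLoop sample 7 0x4000
  let mantissa := PySem.Int.band (sample >>> (exponent + 3).toNat) 0x0F
  PySem.Int.band (Int.not (PySem.Int.bor (PySem.Int.bor sign (exponent <<< (4 : Nat))) mantissa)) 0xFF

-- ===== PORT B =====
-- _SEG = [0] + [1] + [2]*2 + [3]*4 + [4]*8 + [5]*16 + [6]*32 + [7]*64
def pvSegTable : List Int :=
  [0] ++ [1] ++ List.replicate 2 2 ++ List.replicate 4 3 ++ List.replicate 8 4 ++
  List.replicate 16 5 ++ List.replicate 32 6 ++ List.replicate 64 7

def linear_to_mulaw_py_alt (sample : Int) : Int :=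
  let sign := PySem.Int.band (sample >>> 8) 0x80
  let sample := if sign ≠ 0 then -sample else sample
  let sample := if sample > pvMulawClip then pvMulawClip else sample
  let sample := sample + pvMulawBias
  -- _SEG[(sample >> 8) & 0x7F]; the index is always in range (0 ≤ i < 128), so the
  -- .getD 0 totalisation is never exercised
  let exponent := (PySem.List.pyGet? pvSegTable (PySem.Int.band (sample >>> 8) 0x7F)).getD 0
  let mantissa := PySem.Int.band (sample >>> (exponent + 3).toNat) 0x0F
  PySem.Int.band (Int.not (PySem.Int.bor (PySem.Int.bor sign (exponent <<< (4 : Nat))) mantissa)) 0xFF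

-- ===== PRECONDITION & SPEC =====
def Spec_linear_to_mulaw_py (sample : Int) (out : Int) : Prop := out = linear_to_mulaw_py_alt sample
instance (sample : Int) (out : Int) : Decidable (Spec_linear_to_mulaw_py sample out) := by unfold Spec_linear_to_mulaw_py; infer_instance

-- ===== CLAIM (what is proved, stated in full; the proofs are below) =====
def Claim_equal_linear_to_mulaw_py : Prop := ∀ (sample : Int), Dom_linear_to_mulaw_py sample → Spec_linear_to_mulaw_py sample (linear_to_mulaw_py sample)

-- ===== LEMMAS AND PROOFS =====

-- n & 2^k isolates bit k (Nat)
theorem pv_nat_and_two_pow (n : Nat) (k : Nat) : n &&& 2^k = n / 2^k % 2 * 2^k := by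
  rw [Nat.and_two_pow, Nat.testBit_eq_decide_div_mod_eq]
  by_cases h : n / 2^k % 2 = 1
  · simp [h]
  · simp [h]; omega

-- x & 2^k isolates bit k (Python two's-complement semantics, any sign of x)
theorem pv_band_two_pow (x : Int) (k : Nat) :
    PySem.Int.band x (2 ^ k) = x / 2 ^ k % 2 * 2 ^ k := by
  have hpow : ((2:Int)^k).toNat = 2^k := by
    rw [show ((2:Int)) = ((2:Nat):Int) from rfl, ← Nat.cast_pow, Int.toNat_natCast]
  rcases le_or_gt 0 x with hx | hx
  · rw [PySem.Int.band_of_nonneg hx (by positivity), hpow, pv_nat_and_two_pow]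
    have hx' : x = (x.toNat : Int) := by omega
    rw [hx']
    push_cast
    norm_cast
  · unfold PySem.Int.band
    rw [if_neg (by omega), if_pos (by positivity), hpow, Nat.land_comm, pv_nat_and_two_pow]
    set m := (-x - 1).toNat with hm
    have hxm : x = -((m:Int) + 1) := by omega
    set n := m / 2^k with hn
    have hr : m % 2^k < 2^k := Nat.mod_lt _ (by positivity)
    have h0n : 2^k * n + m % 2^k = m := by rw [hn]; exact Nat.div_add_mod m (2^k)
    have h0 : (2:Int)^k * (n:Int) + ((m % 2^k : Nat) : Int) = (m:Int) := by
      exact_mod_cast h0n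
    have hdiv : x / 2^k = -(n:Int) - 1 := by
      have hx2 : x = ((2:Int)^k - ((m % 2^k : Nat) : Int) - 1) + (-((n:Int)+1)) * 2^k := by
        rw [hxm]; linarith
      rw [hx2, Int.add_mul_ediv_right _ _ (by positivity)]
      rw [Int.ediv_eq_zero_of_lt (by push_cast; omega) (by push_cast; omega)]
      ring
    rw [hdiv]
    have hle : n % 2 * 2^k ≤ 2^k := by
      have h1 : n % 2 ≤ 1 := by omega
      calc n % 2 * 2^k ≤ 1 * 2^k := Nat.mul_le_mul_right _ h1
      _ = 2^k := by ring
    have hsub : ((2^k - n % 2 * 2^k : Nat) : Int) = (2:Int)^k - (n:Int) % 2 * 2^k := by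
      push_cast [hle]; ring
    rw [hsub]
    have hmod : (-(n:Int) - 1) % 2 = 1 - (n:Int) % 2 := by omega
    rw [hmod]; ring

-- n & 127 is n mod 128 (Nat)
theorem pv_and127 (n : Nat) : n &&& 127 = n % 128 := by
  have := Nat.and_two_pow_sub_one_eq_mod n 7
  simp only [show (2:Nat)^7 = 128 from rfl] at this
  exact this

-- x & 127 is x mod 128 (Python two's-complement semantics, any sign of x)
theorem pv_band_127 (x : Int) : PySem.Int.band x 127 = x % 128 := by
  rcases le_or_gt 0 x with hx | hx
  · rw [PySem.Int.band_of_nonneg hx (by norm_num)]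
    rw [show (127:Int).toNat = 127 from rfl, pv_and127]
    have hx' : x = (x.toNat : Int) := by omega
    rw [hx']; push_cast; omega
  · unfold PySem.Int.band
    rw [if_neg (by omega), if_pos (by norm_num)]
    rw [show (127:Int).toNat = 127 from rfl, Nat.land_comm, pv_and127]
    have hb : ((-x-1).toNat : Int) = -x - 1 := by omega
    have hle : (-x-1).toNat % 128 ≤ 127 := by omega
    have h2 : (((127:Nat) - (-x-1).toNat % 128 : Nat) : Int) = 127 - (((-x-1).toNat % 128 : Nat) : Int) := by omega
    rw [h2]
    have h3 : (((-x-1).toNat % 128 : Nat) : Int) = (-x-1) % 128 := by push_cast; rw [hb]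
    rw [h3]; omega

-- the bit-scan loop equals the table lookup, for EVERY integer input
set_option maxRecDepth 8192 in
theorem pv_seg_main (b : Int) :
    pvSegLoop b 7 0x4000 =
      (PySem.List.pyGet? pvSegTable (PySem.Int.band (b >>> 8) 0x7F)).getD 0 := by
  simp only [pvSegLoop]
  rw [show ((16384:Int) >>> (1:Int)) = 8192 from by decide,
      show ((8192:Int) >>> (1:Int)) = 4096 from by decide,
      show ((4096:Int) >>> (1:Int)) = 2048 from by decide,
      show ((2048:Int) >>> (1:Int)) = 1024 from by decide,
      show ((1024:Int) >>> (1:Int)) = 512 from by decide,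
      show ((512:Int) >>> (1:Int)) = 256 from by decide]
  rw [pv_band_127]
  rw [show (16384:Int) = 2^14 from by norm_num, show (8192:Int) = 2^13 from by norm_num,
      show (4096:Int) = 2^12 from by norm_num, show (2048:Int) = 2^11 from by norm_num,
      show (1024:Int) = 2^10 from by norm_num, show (512:Int) = 2^9 from by norm_num,
      show (256:Int) = 2^8 from by norm_num]
  rw [pv_band_two_pow b 14, pv_band_two_pow b 13, pv_band_two_pow b 12,
      pv_band_two_pow b 11, pv_band_two_pow b 10, pv_band_two_pow b 9,
      pv_band_two_pow b 8]
  rw [show (8:Int) = ((8:Nat):Int) from rfl, Int.shiftRight_natCast_right,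
      Int.shiftRight_eq_div_pow]
  norm_num
  have c14 : (2 ∣ b / 16384) ↔ (2 ∣ (b / 256 % 128) / 64) := by omega
  have c13 : (2 ∣ b / 8192) ↔ (2 ∣ (b / 256 % 128) / 32) := by omega
  have c12 : (2 ∣ b / 4096) ↔ (2 ∣ (b / 256 % 128) / 16) := by omega
  have c11 : (2 ∣ b / 2048) ↔ (2 ∣ (b / 256 % 128) / 8) := by omega
  have c10 : (2 ∣ b / 1024) ↔ (2 ∣ (b / 256 % 128) / 4) := by omega
  have c9 : (2 ∣ b / 512) ↔ (2 ∣ (b / 256 % 128) / 2) := by omega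
  have c8 : (2 ∣ b / 256) ↔ (2 ∣ (b / 256 % 128)) := by omega
  simp only [c14, c13, c12, c11, c10, c9, c8]
  have ht0 : 0 ≤ b / 256 % 128 := by omega
  have ht1 : b / 256 % 128 < 128 := by omega
  set t := b / 256 % 128 with htd
  clear_value t
  interval_cases t <;> decide

-- ===== VERDICT (by name: the statement is the Claim_ definition above) =====
theorem linear_to_mulaw_py_spec : Claim_equal_linear_to_mulaw_py := by
  intro sample _
  unfold Spec_linear_to_mulaw_py linear_to_mulaw_py linear_to_mulaw_py_alt
  simp only [pv_seg_main]
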